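-- pv_equiv track=rewrite | github.com/wisebarbie/misc | 202-19F-A4/Chin/construct_patients.py | verify_temp
-- ===== SOURCE A (Python) =====
-- def verify_temp(token):
--     do_we_have_num =  False
--     period_is_there= 0
--     cleanTemp = []
--     for char in token:
--         if char.isdigit():
--             do_we_have_num=True
--             cleanTemp.append(char)
--         if char == '.' and do_we_have_num and period_is_there == 0:
--             period_is_there += 1
--             cleanTemp.append(char)
--     return ''.join(cleanTemp)
-- ===== SOURCE B (Python) =====
-- def verify_temp(token):
--     # locate the first '.' that has at least one digit somewhere before it
--     has_digit = False
--     for i, ch in enumerate(token):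
--         if ch == '.' and has_digit:
--             pre = ''.join(c for c in token[:i] if c.isdigit())
--             post = ''.join(c for c in token[i + 1:] if c.isdigit())
--             return pre + '.' + post
--         if ch.isdigit():
--             has_digit = True
--     return ''.join(c for c in token if c.isdigit())
-- ===== Notes on version B (the rewrite author's own statement) =====
-- stated objective: alternative
-- what changed: Replaces A's single flag-driven accumulating pass with a boundary search for the first '.' preceded by a digit, then builds the result from two independent digit filters of the parts before and after that boundary (or one filter of the whole string if no valid '.').
import Mathlib
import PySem

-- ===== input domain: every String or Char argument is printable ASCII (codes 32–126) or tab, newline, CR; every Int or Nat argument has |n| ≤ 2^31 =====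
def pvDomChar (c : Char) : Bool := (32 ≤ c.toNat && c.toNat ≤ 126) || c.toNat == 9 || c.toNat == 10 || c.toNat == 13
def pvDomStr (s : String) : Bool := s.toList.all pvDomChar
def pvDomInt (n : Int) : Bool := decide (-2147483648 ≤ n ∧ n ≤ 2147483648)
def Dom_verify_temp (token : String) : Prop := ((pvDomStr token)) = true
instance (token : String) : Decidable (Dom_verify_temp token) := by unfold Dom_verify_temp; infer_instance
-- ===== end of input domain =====

-- B locates the first valid '.' boundary and concatenates two digit filters instead of A's single flag-driven pass.

-- ===== PORT A =====
-- state: (do_we_have_num, period_is_there, cleanTemp)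
def aStep (st : Bool × Int × List Char) (char : Char) : Bool × Int × List Char :=
  let st := if PySem.Chars.isdigit char = true then (true, st.2.1, st.2.2 ++ [char]) else st
  if char = '.' ∧ st.1 = true ∧ st.2.1 = 0 then (st.1, st.2.1 + 1, st.2.2 ++ [char]) else st

def verify_temp (token : String) : String :=
  String.mk ((token.toList.foldl aStep (false, 0, [])).2.2)

-- ===== PORT B =====
-- returns (token[:i], token[i+1:]) for the first i with token[i] = '.' and a digit before i, else none
def altSplit : List Char → Bool → Option (List Char × List Char)
  | [], _ => none
  | c :: cs, hd =>
    if c = '.' ∧ hd = true then some ([], cs)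
    else
      match altSplit cs (hd || PySem.Chars.isdigit c) with
      | none => none
      | some (p, s) => some (c :: p, s)

def verify_temp_alt (token : String) : String :=
  match altSplit token.toList false with
  | some (p, s) =>
      String.mk (p.filter PySem.Chars.isdigit ++ '.' :: s.filter PySem.Chars.isdigit)
  | none => String.mk (token.toList.filter PySem.Chars.isdigit)

-- ===== PRECONDITION & SPEC =====
def Spec_verify_temp (token : String) (out : String) : Prop := out = verify_temp_alt token
instance (token : String) (out : String) : Decidable (Spec_verify_temp token out) := by unfold Spec_verify_temp; infer_instance

-- ===== CLAIM (what is proved, stated in full; the proofs are below) =====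
def Claim_equal_verify_temp : Prop := ∀ (token : String), Dom_verify_temp token → Spec_verify_temp token (verify_temp token)

-- ===== LEMMAS AND PROOFS =====

-- once the period has been taken (period_is_there = 1) A only collects digits
lemma foldl_post (cs : List Char) (hn : Bool) (acc : List Char) :
    (cs.foldl aStep (hn, 1, acc)).2.2 = acc ++ cs.filter PySem.Chars.isdigit := by
  induction cs generalizing hn acc with
  | nil => simp
  | cons c cs ih =>
    by_cases hd : PySem.Chars.isdigit c = true
    · simp [List.foldl_cons, aStep, hd, ih]
    · simp [List.foldl_cons, aStep, hd, ih]

-- the main invariant relating A's pass (period not yet taken) to B's split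
lemma foldl_main (cs : List Char) (hn : Bool) (acc : List Char) :
    (cs.foldl aStep (hn, 0, acc)).2.2 =
      match altSplit cs hn with
      | some (p, s) => acc ++ p.filter PySem.Chars.isdigit ++ '.' :: s.filter PySem.Chars.isdigit
      | none => acc ++ cs.filter PySem.Chars.isdigit := by
  induction cs generalizing hn acc with
  | nil => simp [altSplit]
  | cons c cs ih =>
    by_cases hc : c = '.'
    · subst hc
      by_cases hhn : hn = true
      · subst hhn
        have : PySem.Chars.isdigit '.' = false := by decide
        simp [List.foldl_cons, aStep, this, altSplit, foldl_post]
      · have hn0 : hn = false := by cases hn <;> simp_all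
        subst hn0
        have : PySem.Chars.isdigit '.' = false := by decide
        simp only [List.foldl_cons, aStep, this, Bool.false_or, ite_false,
          Bool.false_eq_true,
          and_false, false_and, altSplit]
        rw [ih]
        cases altSplit cs false <;> simp [this]
    · by_cases hd : PySem.Chars.isdigit c = true
      · have step : aStep (hn, 0, acc) c = (true, 0, acc ++ [c]) := by
          simp [aStep, hd, hc]
        rw [List.foldl_cons, step, ih]
        simp only [altSplit, hc, false_and, ite_false, hd, Bool.or_true]
        cases altSplit cs true <;> simp [hd]
      · have step : aStep (hn, 0, acc) c = (hn, 0, acc) := by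
          simp [aStep, hd, hc]
        rw [List.foldl_cons, step, ih]
        simp only [altSplit, hc, false_and, ite_false, hd, Bool.or_false]
        cases altSplit cs hn <;> simp [hd]

-- ===== VERDICT (by name: the statement is the Claim_ definition above) =====
theorem verify_temp_spec : Claim_equal_verify_temp := by
  intro token _
  unfold Spec_verify_temp verify_temp verify_temp_alt
  rw [foldl_main]
  cases altSplit token.toList false <;> simp
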